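-- pv_equiv track=rewrite | github.com/Asunqingwen/LeetCode | easy/X of a Kind in a Deck of Cards.py | hasGroupsSizeX1
-- ===== SOURCE A (Python) =====
-- import collections
-- from typing import List
--
-- def hasGroupsSizeX1(deck: List[int]) -> bool:
-- 	count = collections.Counter(deck)
-- 	min_value = min(count.values())
-- 	if min_value < 2:
-- 		return False
-- 	for i in range(min_value + 1, 1, -1):
-- 		result = all(value % i == 0 for value in count.values())
-- 		if result:
-- 			return True
-- 	return False
-- ===== SOURCE B (Python) =====
-- import collections
-- from typing import List
--
-- def hasGroupsSizeX1(deck: List[int]) -> bool: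
-- 	count = collections.Counter(deck)
-- 	g = 0
-- 	for v in count.values():
-- 		a, b = g, v
-- 		while b:
-- 			a, b = b, a % b
-- 		g = a
-- 	return g >= 2
-- ===== Notes on version B (the rewrite author's own statement) =====
-- stated objective: alternative
-- what changed: Replaces the descending trial-division loop over candidate group sizes by a single fold accumulating the GCD of all counts with an inline Euclidean loop, returning gcd >= 2.
import Mathlib
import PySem

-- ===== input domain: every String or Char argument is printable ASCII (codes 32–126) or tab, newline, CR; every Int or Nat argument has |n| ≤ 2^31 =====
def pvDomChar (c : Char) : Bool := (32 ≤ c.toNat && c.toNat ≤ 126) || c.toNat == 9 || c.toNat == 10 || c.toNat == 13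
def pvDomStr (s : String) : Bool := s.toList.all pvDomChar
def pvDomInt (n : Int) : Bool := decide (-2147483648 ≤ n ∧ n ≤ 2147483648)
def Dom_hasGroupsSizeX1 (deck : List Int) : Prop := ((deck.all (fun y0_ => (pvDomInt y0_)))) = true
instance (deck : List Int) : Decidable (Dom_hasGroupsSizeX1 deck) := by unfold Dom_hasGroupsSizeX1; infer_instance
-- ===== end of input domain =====

-- B replaces A's descending trial-division loop over candidate sizes by one GCD fold over the counts (alternative algorithm; return values only).


-- ===== PORT A =====
def hasGroupsSizeX1 (deck : List Int) : Bool :=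
  let count := PySem.Dict.counter deck
  match PySem.List.min? count.values (fun v => v) with
  | none => false  -- Python: min() of an empty sequence raises ValueError; excluded by Pre_
  | some minValue =>
    if minValue < 2 then false
    else
      -- for i in range(min_value+1, 1, -1): if all(v % i == 0): return True / return False
      (PySem.List.pyRange (minValue + 1) 1 (-1)).any
        (fun i => count.values.all (fun v => PySem.Int.mod v i == 0))

-- ===== PORT B =====
-- termination fact for the Euclidean while-loop (cited by pygcd's decreasing_by)
theorem pygcd_mod_natAbs_lt (a b : Int) (h : ¬ b = 0) :
    (PySem.Int.mod a b).natAbs < b.natAbs := by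
  rcases lt_or_gt_of_ne h with hneg | hpos
  · have := PySem.Int.mod_neg_bounds a hneg
    omega
  · have h1 := PySem.Int.mod_nonneg a hpos
    have h2 := PySem.Int.mod_lt a hpos
    omega

-- 'a, b = g, v; while b: a, b = b, a % b'
def pygcd (a b : Int) : Int :=
  if _h : b = 0 then a else pygcd b (PySem.Int.mod a b)
termination_by b.natAbs
decreasing_by exact pygcd_mod_natAbs_lt a b _h

def hasGroupsSizeX1_alt (deck : List Int) : Bool :=
  let count := PySem.Dict.counter deck
  let g := count.values.foldl pygcd 0
  decide (2 ≤ g)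

-- ===== PRECONDITION & SPEC =====
-- Pre_ excludes exactly the empty deck, on which Python A raises ValueError (min() of empty sequence).
def Pre_hasGroupsSizeX1 (deck : List Int) : Prop := deck ≠ []
instance (deck : List Int) : Decidable (Pre_hasGroupsSizeX1 deck) := by unfold Pre_hasGroupsSizeX1; infer_instance
def pvWitness_hasGroupsSizeX1 : List Int := ([1, 1])

def Spec_hasGroupsSizeX1 (deck : List Int) (out : Bool) : Prop := out = hasGroupsSizeX1_alt deck
instance (deck : List Int) (out : Bool) : Decidable (Spec_hasGroupsSizeX1 deck out) := by unfold Spec_hasGroupsSizeX1; infer_instance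

-- ===== CLAIM (what is proved, stated in full; the proofs are below) =====
def Claim_equal_hasGroupsSizeX1 : Prop := ∀ (deck : List Int), Dom_hasGroupsSizeX1 deck → Pre_hasGroupsSizeX1 deck → Spec_hasGroupsSizeX1 deck (hasGroupsSizeX1 deck)


-- ===== LEMMAS AND PROOFS =====

theorem int_dvd_gcd_cast (d a b : Int) (h1 : d ∣ a) (h2 : d ∣ b) :
    d ∣ ((Int.gcd a b : Nat) : Int) := by
  rw [← Int.natAbs_dvd] at h1 h2 ⊢
  exact Int.natCast_dvd_natCast.mpr (Int.dvd_gcd h1 h2)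

-- the Euclidean loop computes Int.gcd on nonnegative inputs
theorem pygcd_eq_gcd_aux : ∀ (n : Nat) (a b : Int), 0 ≤ a → 0 ≤ b → b.natAbs ≤ n →
    pygcd a b = (Int.gcd a b : Int) := by
  intro n
  induction n with
  | zero =>
    intro a b ha hb hn
    have hb0 : b = 0 := by omega
    subst hb0
    rw [pygcd]
    simp [Int.gcd, Int.natAbs_of_nonneg ha]
  | succ n ih =>
    intro a b ha hb hn
    by_cases h : b = 0
    · subst h
      rw [pygcd]
      simp [Int.gcd, Int.natAbs_of_nonneg ha]
    · rw [pygcd]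
      simp only [h, dite_false]
      have hbpos : 0 < b := lt_of_le_of_ne hb (Ne.symm h)
      have hmod : PySem.Int.mod a b = a % b := PySem.Int.mod_eq_emod_of_pos hbpos
      have hmn : (PySem.Int.mod a b).natAbs < b.natAbs := pygcd_mod_natAbs_lt a b h
      rw [ih b (PySem.Int.mod a b) hb (by rw [hmod]; exact Int.emod_nonneg a h) (by omega)]
      rw [hmod]
      congr 1
      -- Int.gcd b (a % b) = Int.gcd a b on nonnegative inputs
      have hA : a.natAbs = a.toNat := by omega
      have hB : b.natAbs = b.toNat := by omega
      have hM : (a % b).natAbs = a.toNat % b.toNat := by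
        have e1 : ((a.toNat : Int)) = a := Int.toNat_of_nonneg ha
        have e2 : ((b.toNat : Int)) = b := Int.toNat_of_nonneg hb
        have : ((a.toNat % b.toNat : Nat) : Int) = a % b := by push_cast; rw [e1, e2]
        omega
      unfold Int.gcd
      rw [hA, hB, hM, Nat.gcd_comm, ← Nat.gcd_rec, Nat.gcd_comm]

theorem pygcd_eq_gcd (a b : Int) (ha : 0 ≤ a) (hb : 0 ≤ b) :
    pygcd a b = (Int.gcd a b : Int) :=
  pygcd_eq_gcd_aux b.natAbs a b ha hb le_rfl

-- the gcd fold, on the Nat side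
def gfold (vs : List Int) (g : Nat) : Nat := vs.foldl (fun n v => Int.gcd (n : Int) v) g

theorem foldl_pygcd_eq (vs : List Int) : ∀ (g : Int), 0 ≤ g → (∀ v ∈ vs, 0 ≤ v) →
    vs.foldl pygcd g = ((gfold vs g.toNat : Nat) : Int) := by
  induction vs with
  | nil => intro g hg _; simp [gfold, Int.toNat_of_nonneg hg]
  | cons v t ih =>
    intro g hg hv
    have hv0 : 0 ≤ v := hv v (by simp)
    simp only [List.foldl_cons, gfold]
    rw [pygcd_eq_gcd g v hg hv0,
        ih (Int.gcd g v : Int) (by positivity) (fun w hw => hv w (by simp [hw]))]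
    simp [gfold, Int.toNat_of_nonneg hg]

theorem gfold_dvd (vs : List Int) : ∀ (g : Nat),
    ((gfold vs g : Nat) : Int) ∣ (g : Int) ∧ ∀ v ∈ vs, ((gfold vs g : Nat) : Int) ∣ v := by
  induction vs with
  | nil => intro g; simp [gfold]
  | cons v t ih =>
    intro g
    simp only [gfold, List.foldl_cons]
    have := ih (Int.gcd (g : Int) v)
    refine ⟨this.1.trans (Int.gcd_dvd_left ..), fun w hw => ?_⟩
    rcases List.mem_cons.mp hw with rfl | hwt
    · exact this.1.trans (Int.gcd_dvd_right ..)
    · exact this.2 w hwt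

theorem dvd_gfold (vs : List Int) : ∀ (g : Nat) (d : Int), d ∣ (g : Int) →
    (∀ v ∈ vs, d ∣ v) → d ∣ ((gfold vs g : Nat) : Int) := by
  induction vs with
  | nil => intro g d hd _; simpa [gfold] using hd
  | cons v t ih =>
    intro g d hd hv
    simp only [gfold, List.foldl_cons]
    exact ih _ d (int_dvd_gcd_cast d _ v hd (hv v (by simp))) (fun w hw => hv w (by simp [hw]))

-- ===== VERDICT (by name: the statement is the Claim_ definition above) =====
theorem hasGroupsSizeX1_spec : Claim_equal_hasGroupsSizeX1 := by
  intro deck _ hpre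
  unfold Spec_hasGroupsSizeX1
  simp only [hasGroupsSizeX1, hasGroupsSizeX1_alt]
  set vs := (PySem.Dict.counter deck).values with hvs
  -- the counts are the multiplicities of the distinct cards; all ≥ 1, and vs ≠ []
  have hvals : vs = (PySem.Set.ofList deck).map (fun k => ((deck.count k : Nat) : Int)) := by
    rw [hvs, PySem.Dict.values, PySem.Dict.items_counter, List.map_map]
    rfl
  have hpos : ∀ v ∈ vs, 1 ≤ v := by
    intro v hv
    rw [hvals] at hv
    obtain ⟨k, hk, rfl⟩ := List.mem_map.mp hv
    have : k ∈ deck := (PySem.Set.mem_ofList _ _).mp hk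
    have := List.count_pos_iff.mpr this
    omega
  have hne : vs ≠ [] := by
    rw [hvals]
    rcases deck with _ | ⟨d, t⟩
    · exact absurd rfl hpre
    · simp only [ne_eq, List.map_eq_nil_iff]
      intro h
      have : d ∈ PySem.Set.ofList (d :: t) := (PySem.Set.mem_ofList _ _).mpr (by simp)
      simp [h] at this
  -- B's value
  have hfold : vs.foldl pygcd 0 = ((gfold vs 0 : Nat) : Int) := by
    have := foldl_pygcd_eq vs 0 le_rfl (fun v hv => le_trans (by omega) (hpos v hv))
    simpa using this
  set N := gfold vs 0 with hN
  have hNdvd : ∀ v ∈ vs, ((N : Nat) : Int) ∣ v := (gfold_dvd vs 0).2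
  rw [hfold]
  -- A's min
  rcases hmin : PySem.List.min? vs (fun v => v) with _ | m
  · exact absurd ((PySem.List.min?_eq_none_iff _ _).mp hmin) hne
  dsimp only
  have hmmem : m ∈ vs := PySem.List.min?_mem hmin
  have hmle : ∀ v ∈ vs, m ≤ v := PySem.List.min?_isMin hmin
  have hm1 : 1 ≤ m := hpos m hmmem
  have hNm : ((N : Nat) : Int) ∣ m := hNdvd m hmmem
  by_cases hm2 : m < 2
  · -- min count is 1, so N divides 1 and both sides are false
    have hm : m = 1 := by omega
    have : (N : Int) ∣ 1 := hm ▸ hNm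
    have hN1 : (N : Int) ≤ 1 := Int.le_of_dvd (by norm_num) this
    rw [if_pos hm2]
    symm
    rw [decide_eq_false_iff_not]
    omega
  · rw [if_neg hm2]
    by_cases hB : 2 ≤ ((N : Nat) : Int)
    · -- gcd ≥ 2: i = N witnesses A's loop
      have hNlem : ((N : Nat) : Int) ≤ m := Int.le_of_dvd (by omega) hNm
      have hany : (PySem.List.pyRange (m + 1) 1 (-1)).any
          (fun i => vs.all (fun v => PySem.Int.mod v i == 0)) = true := by
        rw [List.any_eq_true]
        refine ⟨((N : Nat) : Int), ?_, ?_⟩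
        · rw [PySem.List.mem_pyRange_neg_one]
          omega
        · rw [List.all_eq_true]
          intro v hv
          simpa [PySem.Int.mod_eq_zero_iff_dvd] using hNdvd v hv
      rw [hany]
      symm
      rw [decide_eq_true_eq]
      exact hB
    · -- gcd < 2: no i ≥ 2 divides all counts
      have hA : (PySem.List.pyRange (m + 1) 1 (-1)).any
          (fun i => vs.all (fun v => PySem.Int.mod v i == 0)) = false := by
        rw [List.any_eq_false]
        intro i hi hall
        rw [PySem.List.mem_pyRange_neg_one] at hi
        rw [List.all_eq_true] at hall
        have hidvd : i ∣ ((N : Nat) : Int) := by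
          refine dvd_gfold vs 0 i (by simp) (fun v hv => ?_)
          have := hall v hv
          simpa [PySem.Int.mod_eq_zero_iff_dvd] using this
        have hNne : (N : Int) ≠ 0 := by
          intro h0
          rw [h0] at hNm
          have : m = 0 := Int.zero_dvd.mp hNm
          omega
        have : i ≤ ((N : Nat) : Int) := Int.le_of_dvd (by omega) hidvd
        omega
      rw [hA]
      symm
      rw [decide_eq_false_iff_not]
      exact hB
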